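-- pv_equiv track=rewrite | github.com/venkatsvpr/Problems_Solved | LC_Largest_Substring_Between_Two_Equal_Characters.py | maxLengthBetweenEqualCharacters
-- ===== SOURCE A (Python) =====
-- import collections
--
-- def maxLengthBetweenEqualCharacters(s):
--     """
--     :type s: str
--     :rtype: int
--     """
--     charSet = collections.defaultdict(set)
--     anyTwice = False
--     chrs = set()
--     for idx,ch in enumerate(s):
--         chrs.add(ch)
--         charSet[ch].add(idx)
--         if len(charSet[ch]) > 1:
--             anyTwice = True
--     if not anyTwice:
--         return -1
--     maxLen = -1
--     for ch in chrs:
--         start = -1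
--         for idx in sorted(charSet[ch]):
--             if (start == -1):
--                 start = idx
--                 continue
--             maxLen = max(maxLen, idx-start-1)
--     return maxLen
-- ===== SOURCE B (Python) =====
-- def maxLengthBetweenEqualCharacters(s):
--     first = {}
--     res = -1
--     for i, ch in enumerate(s):
--         if ch in first:
--             res = max(res, i - first[ch] - 1)
--         else:
--             first[ch] = i
--     return res
-- ===== Notes on version B (the rewrite author's own statement) =====
-- stated objective: faster
-- what changed: Replaces the two-phase defaultdict-of-index-sets plus per-character sorted scans with a single pass that records each character's first occurrence and maxes i - first - 1.
import Mathlib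
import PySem

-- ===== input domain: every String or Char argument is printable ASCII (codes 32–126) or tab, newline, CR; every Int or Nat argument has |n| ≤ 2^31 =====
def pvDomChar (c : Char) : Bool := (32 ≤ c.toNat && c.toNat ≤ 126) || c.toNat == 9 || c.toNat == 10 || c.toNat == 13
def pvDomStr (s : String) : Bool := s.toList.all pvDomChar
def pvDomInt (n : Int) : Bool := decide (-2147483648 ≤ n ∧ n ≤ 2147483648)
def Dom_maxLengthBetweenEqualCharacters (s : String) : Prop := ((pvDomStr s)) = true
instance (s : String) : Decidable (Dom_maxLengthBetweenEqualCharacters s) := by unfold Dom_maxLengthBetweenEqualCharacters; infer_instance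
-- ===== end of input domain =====

-- A: defaultdict-of-index-sets then per-character sorted scans; B: one pass keeping each
-- character's first occurrence index and maxing i - first - 1 (faster: O(n) vs O(n log n)).


-- ===== PORT A =====
-- phase-1 loop body: chrs.add(ch); charSet[ch].add(idx); anyTwice |= len(charSet[ch]) > 1
def pvStepA (acc : PySem.Dict Char (PySem.Set Int) × Bool × PySem.Set Char)
    (p : Int × Char) : PySem.Dict Char (PySem.Set Int) × Bool × PySem.Set Char :=
  let chrs := PySem.Set.add acc.2.2 p.2
  let cur := PySem.Set.add (acc.1.getD p.2 PySem.Set.empty) p.1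
  let charSet := acc.1.insert p.2 cur
  let anyTwice := acc.2.1 || decide (1 < PySem.Set.len cur)
  (charSet, anyTwice, chrs)

-- inner loop body over sorted(charSet[ch]): state (start, maxLen)
def pvStepInner (q : Int × Int) (idx : Int) : Int × Int :=
  if q.1 = -1 then (idx, q.2) else (q.1, max q.2 (idx - q.1 - 1))

def maxLengthBetweenEqualCharacters (s : String) : Int :=
  let st := (PySem.List.enumerate s.toList).foldl pvStepA
    (PySem.Dict.empty, false, PySem.Set.empty)
  if st.2.1 = false then -1
  else
    -- iterate the character set (result is independent of the set's order: a max of per-char maxima)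
    st.2.2.foldl (fun maxLen ch =>
      ((PySem.List.sorted (st.1.getD ch PySem.Set.empty) (fun x => x) false).foldl
        pvStepInner (-1, maxLen)).2) (-1)

-- ===== PORT B =====
-- loop body: if ch in first: res = max(res, i - first[ch] - 1) else: first[ch] = i
def pvStepB (acc : PySem.Dict Char Int × Int) (p : Int × Char) : PySem.Dict Char Int × Int :=
  match acc.1.get? p.2 with
  | some f => (acc.1, max acc.2 (p.1 - f - 1))
  | none => (acc.1.insert p.2 p.1, acc.2)

def maxLengthBetweenEqualCharacters_alt (s : String) : Int :=
  ((PySem.List.enumerate s.toList).foldl pvStepB (PySem.Dict.empty, -1)).2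

-- ===== PRECONDITION & SPEC =====
def Spec_maxLengthBetweenEqualCharacters (s : String) (out : Int) : Prop := out = maxLengthBetweenEqualCharacters_alt s
instance (s : String) (out : Int) : Decidable (Spec_maxLengthBetweenEqualCharacters s out) := by unfold Spec_maxLengthBetweenEqualCharacters; infer_instance

-- ===== CLAIM (what is proved, stated in full; the proofs are below) =====
def Claim_equal_maxLengthBetweenEqualCharacters : Prop := ∀ (s : String), Dom_maxLengthBetweenEqualCharacters s → Spec_maxLengthBetweenEqualCharacters s (maxLengthBetweenEqualCharacters s)

-- ===== LEMMAS AND PROOFS =====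

-- r is "the answer" for cs: it bounds every equal-pair gap, and is -1 or an attained gap
def PGood (cs : List Char) (r : Int) : Prop :=
  (∀ i j : Nat, ∀ hi : i < cs.length, ∀ hj : j < cs.length, i < j → cs[i] = cs[j] →
      (j : Int) - (i : Int) - 1 ≤ r) ∧
  (r = -1 ∨ ∃ i j : Nat, ∃ hi : i < cs.length, ∃ hj : j < cs.length, i < j ∧ cs[i] = cs[j] ∧
      (j : Int) - (i : Int) - 1 = r)

theorem pgood_le (cs : List Char) (r₁ r₂ : Int) (h₁ : PGood cs r₁) (h₂ : PGood cs r₂) :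
    r₁ ≤ r₂ := by
  rcases h₁.2 with h | ⟨i, j, hi, hj, hij, _, hg⟩
  · subst h
    rcases h₂.2 with h | ⟨i, j, hi, hj, hij, _, hg⟩
    · omega
    · omega
  · have := h₂.1 i j hi hj hij ‹_›
    omega

theorem pgood_unique (cs : List Char) (r₁ r₂ : Int) (h₁ : PGood cs r₁) (h₂ : PGood cs r₂) :
    r₁ = r₂ :=
  le_antisymm (pgood_le cs r₁ r₂ h₁ h₂) (pgood_le cs r₂ r₁ h₂ h₁)

-- lift the "attained" clause of PGood along appending one character
theorem pgood_attained_lift (p : List Char) (x : Char) (r : Int)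
    (h : r = -1 ∨ ∃ i j : Nat, ∃ hi : i < p.length, ∃ hj : j < p.length, i < j ∧ p[i] = p[j] ∧
      (j : Int) - (i : Int) - 1 = r) :
    r = -1 ∨ ∃ i j : Nat, ∃ hi : i < (p ++ [x]).length, ∃ hj : j < (p ++ [x]).length,
      i < j ∧ (p ++ [x])[i] = (p ++ [x])[j] ∧ (j : Int) - (i : Int) - 1 = r := by
  rcases h with h | ⟨i, j, hi, hj, hij, he, hg⟩
  · exact Or.inl h
  · refine Or.inr ⟨i, j, by simp; omega, by simp; omega, hij, ?_, hg⟩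
    rwa [List.getElem_append_left hi, List.getElem_append_left hj]

-- ---------- B side ----------

theorem b_inv (cs : List Char) :
    (∀ c : Char, ((PySem.List.enumerate cs).foldl pvStepB (PySem.Dict.empty, -1)).1.get? c
        = (PySem.List.index? cs c).map (fun n : Nat => (n : Int))) ∧
    PGood cs ((PySem.List.enumerate cs).foldl pvStepB (PySem.Dict.empty, -1)).2 := by
  induction cs using List.reverseRecOn with
  | nil =>
    refine ⟨fun c => by simp [PySem.List.enumerate, PySem.List.index?], ?_, Or.inl rfl⟩
    intro i j hi hj
    simp at hi
  | append_singleton p x ih =>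
    obtain ⟨ihd, ihg⟩ := ih
    have hrw : (PySem.List.enumerate (p ++ [x])).foldl pvStepB (PySem.Dict.empty, -1)
        = pvStepB ((PySem.List.enumerate p).foldl pvStepB (PySem.Dict.empty, -1))
            ((p.length : Int), x) := by
      rw [PySem.List.enumerate_append]
      simp [PySem.List.enumerate_cons, PySem.List.enumerate_nil]
    set st := (PySem.List.enumerate p).foldl pvStepB (PySem.Dict.empty, -1) with hst
    by_cases hx : x ∈ p
    · obtain ⟨k, hk⟩ : ∃ k, PySem.List.index? p x = some k := by
        have := (PySem.List.index?_isSome_iff p x).2 hx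
        exact Option.isSome_iff_exists.mp this
      obtain ⟨hklt, hpk, hkmin⟩ := PySem.List.getElem_of_index?_eq_some hk
      have hget : st.1.get? x = some (k : Int) := by rw [ihd x, hk]; rfl
      have hstep : pvStepB st ((p.length : Int), x)
          = (st.1, max st.2 ((p.length : Int) - (k : Int) - 1)) := by
        simp [pvStepB, hget]
      rw [hrw, hstep]
      refine ⟨?_, ?_, ?_⟩
      · intro c
        by_cases hc : c ∈ p
        · rw [ihd c, PySem.List.index?_append_of_mem [x] hc]
        · have hcx : c ≠ x := fun h => hc (h ▸ hx)
          have h1 : PySem.List.index? p c = none := (PySem.List.index?_eq_none_iff _ _).2 hc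
          have h2 : PySem.List.index? (p ++ [x]) c = none := by
            refine (PySem.List.index?_eq_none_iff _ _).2 ?_
            simp [hc, hcx]
          rw [ihd c, h1, h2]
      · -- bound clause
        intro i j hi hj hij heq
        simp only [List.length_append, List.length_singleton] at hi hj
        by_cases hjp : j < p.length
        · have hip : i < p.length := by omega
          rw [List.getElem_append_left hip, List.getElem_append_left hjp] at heq
          exact le_trans (ihg.1 i j hip hjp hij heq) (le_max_left _ _)
        · have hj' : j = p.length := by omega
          subst hj'
          have hip : i < p.length := hij
          rw [List.getElem_append_left hip, List.getElem_concat_length rfl] at heq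
          have hki : k ≤ i := by
            by_contra hlt
            exact hkmin i (by omega) heq
          have : (p.length : Int) - (i : Int) - 1 ≤ (p.length : Int) - (k : Int) - 1 := by omega
          exact le_trans (by omega) (le_max_right st.2 _)
      · -- attained clause
        rcases max_choice st.2 ((p.length : Int) - (k : Int) - 1) with hm | hm
        · rw [hm]; exact pgood_attained_lift p x st.2 ihg.2
        · rw [hm]
          refine Or.inr ⟨k, p.length, by simp only [List.length_append, List.length_singleton]; omega,
            by simp, hklt, ?_, rfl⟩
          rw [List.getElem_append_left hklt, List.getElem_concat_length rfl]
          exact hpk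
    · have hget : st.1.get? x = none := by
        rw [ihd x, (PySem.List.index?_eq_none_iff _ _).2 hx]; rfl
      have hstep : pvStepB st ((p.length : Int), x)
          = (st.1.insert x (p.length : Int), st.2) := by
        simp [pvStepB, hget]
      rw [hrw, hstep]
      refine ⟨?_, ?_, ?_⟩
      · intro c
        by_cases hcx : c = x
        · subst hcx
          rw [PySem.Dict.get?_insert_self, PySem.List.index?_append_singleton_self p _ hx]
          rfl
        · rw [PySem.Dict.get?_insert_of_ne _ _ hcx, ihd c]
          by_cases hc : c ∈ p
          · rw [PySem.List.index?_append_of_mem [x] hc]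
          · have h1 : PySem.List.index? p c = none := (PySem.List.index?_eq_none_iff _ _).2 hc
            have h2 : PySem.List.index? (p ++ [x]) c = none := by
              refine (PySem.List.index?_eq_none_iff _ _).2 ?_
              simp [hc, hcx]
            rw [h1, h2]
      · intro i j hi hj hij heq
        simp only [List.length_append, List.length_singleton] at hi hj
        by_cases hjp : j < p.length
        · have hip : i < p.length := by omega
          rw [List.getElem_append_left hip, List.getElem_append_left hjp] at heq
          exact ihg.1 i j hip hjp hij heq
        · have hj' : j = p.length := by omega
          subst hj'
          have hip : i < p.length := hij
          rw [List.getElem_append_left hip, List.getElem_concat_length rfl] at heq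
          exact absurd (heq ▸ List.getElem_mem hip) hx
      · exact pgood_attained_lift p x st.2 ihg.2

theorem b_pgood (s : String) :
    PGood s.toList (maxLengthBetweenEqualCharacters_alt s) :=
  (b_inv s.toList).2

-- ---------- A side ----------

-- occurrence indices of c in cs, in increasing order
def occIdx (c : Char) (cs : List Char) : List Int :=
  (PySem.List.enumerate cs).filterMap (fun p => if p.2 = c then some p.1 else none)

-- the gaps A's inner loop computes for one character's occurrence list
def pvGaps (l : List Int) : List Int :=
  match l with
  | [] => []
  | f :: t => t.map (fun idx => idx - f - 1)

theorem mem_occIdx (c : Char) (cs : List Char) (a : Int) :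
    a ∈ occIdx c cs ↔ ∃ k : Nat, ∃ hk : k < cs.length, cs[k] = c ∧ a = (k : Int) := by
  simp only [occIdx, List.mem_filterMap, PySem.List.mem_enumerate_iff]
  constructor
  · rintro ⟨q, ⟨k, hk, rfl⟩, hf⟩
    by_cases hc : cs[k] = c
    · rw [if_pos hc] at hf
      simp only [Option.some.injEq] at hf
      exact ⟨k, hk, hc, by omega⟩
    · rw [if_neg hc] at hf
      simp at hf
  · rintro ⟨k, hk, hck, ha⟩
    refine ⟨((0 : Int) + (k : Int), cs[k]), ⟨k, hk, rfl⟩, ?_⟩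
    simp [hck, ha]

theorem occIdx_lt (c : Char) (cs : List Char) (a : Int) (ha : a ∈ occIdx c cs) :
    0 ≤ a ∧ a < (cs.length : Int) := by
  obtain ⟨k, hk, _, ha⟩ := (mem_occIdx c cs a).1 ha
  omega

theorem occIdx_append (c : Char) (p : List Char) (x : Char) :
    occIdx c (p ++ [x]) = occIdx c p ++ (if x = c then [((p.length : Nat) : Int)] else []) := by
  simp only [occIdx, PySem.List.enumerate_append, List.filterMap_append,
    PySem.List.enumerate_cons, PySem.List.enumerate_nil]
  congr 1
  split_ifs with h <;> simp [h]

theorem occIdx_pairwise (c : Char) (cs : List Char) : (occIdx c cs).Pairwise (· < ·) := by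
  induction cs using List.reverseRecOn with
  | nil => simp [occIdx, PySem.List.enumerate_nil]
  | append_singleton p x ih =>
    rw [occIdx_append]
    refine List.pairwise_append.2 ⟨ih, ?_, ?_⟩
    · split_ifs <;> simp
    · intro a ha b hb
      have := occIdx_lt c p a ha
      split_ifs at hb with h
      · simp at hb; omega
      · simp at hb

theorem two_le_length {l : List Int} {a b : Int} (hl : a ∈ l) (hb : b ∈ l) (h : a ≠ b) :
    2 ≤ l.length := by
  match l with
  | [] => simp at hl
  | [x] =>
    simp at hl hb
    exact absurd (hl.trans hb.symm) h
  | x :: y :: t => simp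

-- every equal pair's gap is ≤ some recorded gap of its character
theorem pair_gap (cs : List Char) (i j : Nat) (hi : i < cs.length) (hj : j < cs.length)
    (hij : i < j) (heq : cs[i] = cs[j]) :
    ∃ v ∈ pvGaps (occIdx cs[i] cs), (j : Int) - (i : Int) - 1 ≤ v := by
  have hmi : ((i : Nat) : Int) ∈ occIdx cs[i] cs := (mem_occIdx _ cs _).2 ⟨i, hi, rfl, rfl⟩
  have hmj : ((j : Nat) : Int) ∈ occIdx cs[i] cs := (mem_occIdx _ cs _).2 ⟨j, hj, heq.symm, rfl⟩
  have hpw := occIdx_pairwise cs[i] cs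
  rcases hocc : occIdx cs[i] cs with _ | ⟨f, t⟩
  · rw [hocc] at hmi; simp at hmi
  · rw [hocc] at hmi hmj hpw
    have hmin : ∀ a ∈ t, f < a := fun a ha => List.rel_of_pairwise_cons hpw ha
    have hfi : f ≤ (i : Int) := by
      rcases List.mem_cons.1 hmi with h | h
      · omega
      · exact le_of_lt (hmin _ h)
    have hjt : ((j : Nat) : Int) ∈ t := by
      rcases List.mem_cons.1 hmj with h | h
      · omega
      · exact h
    refine ⟨(j : Int) - f - 1, ?_, by omega⟩
    simp only [pvGaps, List.mem_map]
    exact ⟨_, hjt, rfl⟩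

-- every recorded gap is realized by an equal pair
theorem gap_pair (cs : List Char) (c : Char) (v : Int) (hv : v ∈ pvGaps (occIdx c cs)) :
    ∃ i j : Nat, ∃ hi : i < cs.length, ∃ hj : j < cs.length, i < j ∧ cs[i] = cs[j] ∧
      (j : Int) - (i : Int) - 1 = v := by
  have hpw := occIdx_pairwise c cs
  rcases hocc : occIdx c cs with _ | ⟨f, t⟩
  · rw [hocc] at hv; simp [pvGaps] at hv
  · rw [hocc] at hv hpw
    simp only [pvGaps, List.mem_map] at hv
    obtain ⟨idx, hidx, hvv⟩ := hv
    have hmin : ∀ a ∈ t, f < a := fun a ha => List.rel_of_pairwise_cons hpw ha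
    have hflt : f < idx := hmin _ hidx
    have hmf : f ∈ occIdx c cs := by rw [hocc]; exact List.mem_cons_self
    have hmidx : idx ∈ occIdx c cs := by rw [hocc]; exact List.mem_cons_of_mem _ hidx
    obtain ⟨k1, hk1, hck1, hf1⟩ := (mem_occIdx c cs f).1 hmf
    obtain ⟨k2, hk2, hck2, hf2⟩ := (mem_occIdx c cs idx).1 hmidx
    exact ⟨k1, k2, hk1, hk2, by omega, by rw [hck1, hck2], by omega⟩

-- phase 1 of A: the dict holds each character's occurrence list, anyTwice detects a repeat,
-- chrs is the character set
theorem a_phase1 (cs : List Char) :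
    (∀ c : Char, ((PySem.List.enumerate cs).foldl pvStepA
        (PySem.Dict.empty, false, PySem.Set.empty)).1.getD c PySem.Set.empty = occIdx c cs) ∧
    (((PySem.List.enumerate cs).foldl pvStepA
        (PySem.Dict.empty, false, PySem.Set.empty)).2.1 = true
      ↔ ∃ c, 2 ≤ (occIdx c cs).length) ∧
    ((PySem.List.enumerate cs).foldl pvStepA
        (PySem.Dict.empty, false, PySem.Set.empty)).2.2 = PySem.Set.ofList cs := by
  induction cs using List.reverseRecOn with
  | nil =>
    refine ⟨fun c => by simp [PySem.List.enumerate_nil, occIdx, PySem.Dict.getD_empty], ?_, ?_⟩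
    · simp [PySem.List.enumerate_nil, occIdx]
    · simp [PySem.List.enumerate_nil, PySem.Set.ofList]
  | append_singleton p x ih =>
    obtain ⟨ihd, ihb, ihs⟩ := ih
    have hrw : (PySem.List.enumerate (p ++ [x])).foldl pvStepA
          (PySem.Dict.empty, false, PySem.Set.empty)
        = pvStepA ((PySem.List.enumerate p).foldl pvStepA
            (PySem.Dict.empty, false, PySem.Set.empty)) ((p.length : Int), x) := by
      rw [PySem.List.enumerate_append]
      simp [PySem.List.enumerate_cons, PySem.List.enumerate_nil]
    set st := (PySem.List.enumerate p).foldl pvStepA (PySem.Dict.empty, false, PySem.Set.empty)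
      with hst
    have hcur : PySem.Set.add (st.1.getD x PySem.Set.empty) ((p.length : Nat) : Int)
        = occIdx x p ++ [((p.length : Nat) : Int)] := by
      rw [ihd x]
      refine PySem.Set.add_of_not_mem ?_
      intro hmem
      have := occIdx_lt x p _ hmem
      omega
    have hoccx : occIdx x (p ++ [x]) = occIdx x p ++ [((p.length : Nat) : Int)] := by
      rw [occIdx_append, if_pos rfl]
    rw [hrw]
    refine ⟨?_, ?_, ?_⟩
    · intro c
      simp only [pvStepA]
      by_cases hcx : c = x
      · subst hcx
        rw [PySem.Dict.getD_insert, if_pos rfl, hcur, hoccx]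
      · rw [PySem.Dict.getD_insert, if_neg hcx, ihd c, occIdx_append,
          if_neg (fun h => hcx h.symm), List.append_nil]
    · simp only [pvStepA, Bool.or_eq_true, decide_eq_true_eq]
      rw [hcur, ihb]
      constructor
      · rintro (⟨c, hc⟩ | hlen)
        · refine ⟨c, ?_⟩
          rw [occIdx_append]
          have : (occIdx c p).length ≤ (occIdx c p ++ if x = c then [((p.length : Nat) : Int)] else []).length := by
            simp
          omega
        · refine ⟨x, ?_⟩
          rw [hoccx]
          simp only [PySem.Set.len, List.length_append, List.length_singleton] at hlen ⊢
          omega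
      · rintro ⟨c, hc⟩
        by_cases hcx : x = c
        · subst hcx
          rw [hoccx] at hc
          simp only [List.length_append, List.length_singleton] at hc
          right
          simp only [PySem.Set.len, List.length_append, List.length_singleton]
          push_cast
          omega
        · left
          refine ⟨c, ?_⟩
          rw [occIdx_append, if_neg hcx, List.append_nil] at hc
          exact hc
    · simp only [pvStepA]
      rw [ihs, PySem.Set.ofList_append_singleton]

-- A's inner loop with a nonnegative start never resets start and accumulates the max
theorem inner_keep (l : List Int) (st m : Int) (hst : 0 ≤ st) :
    l.foldl pvStepInner (st, m)
      = (st, l.foldl (fun m idx => max m (idx - st - 1)) m) := by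
  induction l generalizing m with
  | nil => rfl
  | cons a t ihl =>
    simp only [List.foldl_cons, pvStepInner, if_neg (show ¬ st = -1 by omega)]
    exact ihl _

-- A's inner loop over one character's (already sorted) occurrence list computes foldl max over gaps
theorem inner_char (l : List Int) (m : Int) (hl : l.Pairwise (· < ·)) (hnn : ∀ a ∈ l, 0 ≤ a) :
    ((PySem.List.sorted l (fun x => x) false).foldl pvStepInner (-1, m)).2
      = (pvGaps l).foldl max m := by
  have hsorted : PySem.List.sorted l (fun x => x) false = l :=
    PySem.List.sorted_eq_of_perm_of_pairwise_lt l l (fun x => x) (List.Perm.refl l) hl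
  rw [hsorted]
  rcases l with _ | ⟨f, t⟩
  · rfl
  · have hf : (0 : Int) ≤ f := hnn f List.mem_cons_self
    simp only [List.foldl_cons, pvStepInner, if_true]
    rw [inner_keep t f m hf]
    simp only [pvGaps]
    rw [← List.foldl_map]

-- A's outer loop: fold over any character list, with the phase-1 dict
theorem outer_fold (cs : List Char) (d : PySem.Dict Char (PySem.Set Int))
    (hd : ∀ c, d.getD c PySem.Set.empty = occIdx c cs) (T : List Char) :
    ∀ m : Int, (m = -1 ∨ ∃ c, m ∈ pvGaps (occIdx c cs)) →
    (∀ c ∈ T, ∀ v ∈ pvGaps (occIdx c cs), v ≤ T.foldl (fun maxLen ch =>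
        ((PySem.List.sorted (d.getD ch PySem.Set.empty) (fun x => x) false).foldl
          pvStepInner (-1, maxLen)).2) m) ∧
    m ≤ T.foldl (fun maxLen ch =>
        ((PySem.List.sorted (d.getD ch PySem.Set.empty) (fun x => x) false).foldl
          pvStepInner (-1, maxLen)).2) m ∧
    (T.foldl (fun maxLen ch =>
        ((PySem.List.sorted (d.getD ch PySem.Set.empty) (fun x => x) false).foldl
          pvStepInner (-1, maxLen)).2) m = -1 ∨
      ∃ c, T.foldl (fun maxLen ch =>
        ((PySem.List.sorted (d.getD ch PySem.Set.empty) (fun x => x) false).foldl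
          pvStepInner (-1, maxLen)).2) m ∈ pvGaps (occIdx c cs)) := by
  induction T with
  | nil => exact fun m hm => ⟨by simp, le_refl m, hm⟩
  | cons c T ihT =>
    intro m hm
    have hbody : ((PySem.List.sorted (d.getD c PySem.Set.empty) (fun x => x) false).foldl
        pvStepInner (-1, m)).2 = (pvGaps (occIdx c cs)).foldl max m := by
      rw [hd c]
      exact inner_char _ m (occIdx_pairwise c cs) (fun a ha => (occIdx_lt c cs a ha).1)
    simp only [List.foldl_cons, hbody]
    set m1 := (pvGaps (occIdx c cs)).foldl max m with hm1
    have hle := PySem.List.le_foldl_max (pvGaps (occIdx c cs)) m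
    have hmem := PySem.List.foldl_max_mem (pvGaps (occIdx c cs)) m
    have hm1good : m1 = -1 ∨ ∃ c', m1 ∈ pvGaps (occIdx c' cs) := by
      rcases hmem with h | h
      · rw [hm1, h]; exact hm
      · exact Or.inr ⟨c, h⟩
    obtain ⟨ih1, ih2, ih3⟩ := ihT m1 hm1good
    refine ⟨?_, le_trans hle.1 ih2, ih3⟩
    intro c' hc' v hv
    rcases List.mem_cons.1 hc' with h | h
    · subst h
      exact le_trans (hle.2 v hv) ih2
    · exact ih1 c' h v hv

theorem a_pgood (s : String) :
    PGood s.toList (maxLengthBetweenEqualCharacters s) := by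
  obtain ⟨hd, hb, hs⟩ := a_phase1 s.toList
  unfold maxLengthBetweenEqualCharacters
  set st := (PySem.List.enumerate s.toList).foldl pvStepA
    (PySem.Dict.empty, false, PySem.Set.empty) with hst
  by_cases htw : st.2.1 = false
  · rw [if_pos htw]
    have hno : ¬ ∃ c, 2 ≤ (occIdx c s.toList).length := by
      intro h
      rw [← hb] at h
      rw [htw] at h
      simp at h
    constructor
    · intro i j hi hj hij heq
      exfalso
      apply hno
      refine ⟨s.toList[i], two_le_length ((mem_occIdx _ _ _).2 ⟨i, hi, rfl, rfl⟩)
        ((mem_occIdx _ _ _).2 ⟨j, hj, heq.symm, rfl⟩) (by omega)⟩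
    · exact Or.inl rfl
  · rw [if_neg htw]
    obtain ⟨hbound, _, hatt⟩ := outer_fold s.toList st.1 hd st.2.2 (-1) (Or.inl rfl)
    constructor
    · intro i j hi hj hij heq
      obtain ⟨v, hvmem, hvle⟩ := pair_gap s.toList i j hi hj hij heq
      have hcmem : s.toList[i] ∈ st.2.2 := by
        rw [hs]
        exact (PySem.Set.mem_ofList _ _).2 (List.getElem_mem hi)
      exact le_trans hvle (hbound _ hcmem v hvmem)
    · rcases hatt with h | ⟨c, h⟩
      · exact Or.inl h
      · exact Or.inr (gap_pair s.toList c _ h)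

-- ===== VERDICT (by name: the statement is the Claim_ definition above) =====
theorem maxLengthBetweenEqualCharacters_spec : Claim_equal_maxLengthBetweenEqualCharacters := by
  intro s _
  exact pgood_unique s.toList _ _ (a_pgood s) (b_pgood s)
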